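-- pv_equiv track=rewrite | github.com/hadd24667/medisync_autocomplete | etl.py | detect_specialties_from_atc
-- ===== SOURCE A (Python) =====
-- ATC_SPECIALTY_MAP = {
--     # A — TIÊU HÓA, DINH DƯỠNG
--     "A01": "dentistry",
--     "A02": "gastro",
--     "A03": "gastro",
--     "A04": "oncology",
--     "A05": "hepatology",
--     "A06": "gastro",
--     "A07": "gastro",
--     "A08": "nutrition",
--     "A09": "nutrition",
--
--     # B — MÁU – ĐÔNG MÁU
--     "B01": "hematology",
--     "B02": "hematology",
--
--     # C — TIM MẠCH
--     "C01": "cardiology",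
--     "C02": "cardiology",
--     "C03": "cardiology",
--     "C04": "cardiology",
--     "C05": "vascular",
--     "C07": "cardiology",
--     "C08": "cardiology",
--     "C09": "cardiology",
--
--     # D — DA LIỄU
--     "D": "dermatology",
--
--     # G — PHỤ KHOA
--     "G01": "gynecology",
--     "G02": "gynecology",
--     "G03": "endocrinology",
--
--     # H — NỘI TIẾT
--     "H": "endocrinology",
--
--     # J — KHÁNG SINH
--     "J": "infectious",
--
--     # L — UNG THƯ
--     "L": "oncology",
--
--     # M — CƠ – KHỚP
--     "M01": "rheumatology",
--     "M03": "neurology",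
--     "M04": "rheumatology",
--     "M05": "rheumatology",
--
--     # N — THẦN KINH – TÂM THẦN
--     "N01": "anesthesiology",
--     "N02": "pain",
--     "N03": "neurology",
--     "N04": "neurology",
--     "N05": "psychiatry",
--     "N06": "psychiatry",
--     "N07": "neurology",
--
--     # R — TAI MŨI HỌNG – HÔ HẤP
--     "R01": "ent",
--     "R02": "ent",
--     "R03": "respiratory",
--     "R05": "respiratory",
--     "R06": "allergy",
--
--     # S — MẮT, TAI
--     "S01": "ophthalmology",
--     "S02": "otology",
--     "S03": "ent",
-- }
--
-- def detect_specialties_from_atc(atc_code: str):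
--     """
--     Map từ mã ATC → chuyên khoa (ưu tiên)
--     """
--     specs = []
--     if not atc_code:
--         return specs
--
--     code = atc_code.upper()
--
--     # Mapping theo prefix từ dài → ngắn
--     for prefix, spec in ATC_SPECIALTY_MAP.items():
--         if code.startswith(prefix):
--             specs.append(spec)
--
--     return list(set(specs))
-- ===== SOURCE B (Python) =====
-- # Two-level trie: dispatch on the first letter, then look the two-digit suffix up
-- # in that letter's sub-table, instead of scanning the flat prefix map.
--
-- _SINGLE_LETTER = {
--     "D": "dermatology",
--     "H": "endocrinology",
--     "J": "infectious",
--     "L": "oncology",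
-- }
--
-- _SUFFIX_BY_LETTER = {
--     "A": {"01": "dentistry", "02": "gastro", "03": "gastro", "04": "oncology",
--           "05": "hepatology", "06": "gastro", "07": "gastro",
--           "08": "nutrition", "09": "nutrition"},
--     "B": {"01": "hematology", "02": "hematology"},
--     "C": {"01": "cardiology", "02": "cardiology", "03": "cardiology",
--           "04": "cardiology", "05": "vascular", "07": "cardiology",
--           "08": "cardiology", "09": "cardiology"},
--     "G": {"01": "gynecology", "02": "gynecology", "03": "endocrinology"},
--     "M": {"01": "rheumatology", "03": "neurology", "04": "rheumatology",
--           "05": "rheumatology"},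
--     "N": {"01": "anesthesiology", "02": "pain", "03": "neurology",
--           "04": "neurology", "05": "psychiatry", "06": "psychiatry",
--           "07": "neurology"},
--     "R": {"01": "ent", "02": "ent", "03": "respiratory", "05": "respiratory",
--           "06": "allergy"},
--     "S": {"01": "ophthalmology", "02": "otology", "03": "ent"},
-- }
--
-- def detect_specialties_from_atc(atc_code: str):
--     """Map ATC code -> specialty via a two-level trie (first letter, then 2-digit suffix)."""
--     if not atc_code:
--         return []
--     code = atc_code.upper()
--     head = code[:1]
--     if head in _SINGLE_LETTER:
--         return [_SINGLE_LETTER[head]]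
--     sub = _SUFFIX_BY_LETTER.get(head)
--     if sub is None:
--         return []
--     spec = sub.get(code[1:3])
--     return [] if spec is None else [spec]
-- ===== Notes on version B (the rewrite author's own statement) =====
-- stated objective: alternative
-- what changed: B replaces A's startswith-scan over the flat 45-entry prefix map (plus the set round-trip) with a two-level trie: the first letter either maps directly to a specialty (D/H/J/L) or selects a per-letter sub-table keyed by the two-digit suffix code[1:3]; since no prefix in A's map overlaps another, at most one entry ever matches and the results coincide.
import Mathlib
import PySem

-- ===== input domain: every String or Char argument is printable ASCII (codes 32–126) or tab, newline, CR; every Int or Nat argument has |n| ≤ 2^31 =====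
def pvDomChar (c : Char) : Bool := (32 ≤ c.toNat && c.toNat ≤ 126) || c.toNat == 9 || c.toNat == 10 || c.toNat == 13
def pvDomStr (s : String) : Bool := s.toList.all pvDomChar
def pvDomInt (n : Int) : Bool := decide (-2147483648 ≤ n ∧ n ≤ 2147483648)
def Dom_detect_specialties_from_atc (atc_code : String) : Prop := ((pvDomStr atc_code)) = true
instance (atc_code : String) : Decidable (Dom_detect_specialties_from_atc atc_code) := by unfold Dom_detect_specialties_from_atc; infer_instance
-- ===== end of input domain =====

-- B replaces A's startswith-scan over the flat 45-entry prefix map with a two-level trie (first letter → either a fixed specialty or a sub-table keyed by the two-digit suffix); return values proved equal, no side effects involved.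

-- ===== PORT A =====
-- module constant of A: the flat ATC prefix → specialty dict, in insertion order
def atcItems : List (String × String) := [("A01","dentistry"), ("A02","gastro"), ("A03","gastro"), ("A04","oncology"), ("A05","hepatology"), ("A06","gastro"), ("A07","gastro"), ("A08","nutrition"), ("A09","nutrition"), ("B01","hematology"), ("B02","hematology"), ("C01","cardiology"), ("C02","cardiology"), ("C03","cardiology"), ("C04","cardiology"), ("C05","vascular"), ("C07","cardiology"), ("C08","cardiology"), ("C09","cardiology"), ("D","dermatology"), ("G01","gynecology"), ("G02","gynecology"), ("G03","endocrinology"), ("H","endocrinology"), ("J","infectious"), ("L","oncology"), ("M01","rheumatology"), ("M03","neurology"), ("M04","rheumatology"), ("M05","rheumatology"), ("N01","anesthesiology"), ("N02","pain"), ("N03","neurology"), ("N04","neurology"), ("N05","psychiatry"), ("N06","psychiatry"), ("N07","neurology"), ("R01","ent"), ("R02","ent"), ("R03","respiratory"), ("R05","respiratory"), ("R06","allergy"), ("S01","ophthalmology"), ("S02","otology"), ("S03","ent")]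

def ATC_SPECIALTY_MAP : PySem.Dict String String := { items := atcItems }

def detect_specialties_from_atc (atc_code : String) : List String :=
  if atc_code = "" then []
  else
    let code := PySem.Str.upper atc_code
    let specs := List.foldl
      (fun acc ps => if PySem.Str.startswith code ps.1 then acc ++ [ps.2] else acc) []
      ATC_SPECIALTY_MAP.items
    PySem.Set.ofList specs

-- ===== PORT B =====
-- B's data: single-letter classes, and per-letter sub-tables keyed by the two-digit suffix
def singleLetter : PySem.Dict String String :=
  { items := [("D","dermatology"), ("H","endocrinology"), ("J","infectious"), ("L","oncology")] }

def subByLetter : PySem.Dict String (PySem.Dict String String) :=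
  { items :=
    [ ("A", { items := [("01","dentistry"), ("02","gastro"), ("03","gastro"), ("04","oncology"), ("05","hepatology"), ("06","gastro"), ("07","gastro"), ("08","nutrition"), ("09","nutrition")] })
    , ("B", { items := [("01","hematology"), ("02","hematology")] })
    , ("C", { items := [("01","cardiology"), ("02","cardiology"), ("03","cardiology"), ("04","cardiology"), ("05","vascular"), ("07","cardiology"), ("08","cardiology"), ("09","cardiology")] })
    , ("G", { items := [("01","gynecology"), ("02","gynecology"), ("03","endocrinology")] })
    , ("M", { items := [("01","rheumatology"), ("03","neurology"), ("04","rheumatology"), ("05","rheumatology")] })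
    , ("N", { items := [("01","anesthesiology"), ("02","pain"), ("03","neurology"), ("04","neurology"), ("05","psychiatry"), ("06","psychiatry"), ("07","neurology")] })
    , ("R", { items := [("01","ent"), ("02","ent"), ("03","respiratory"), ("05","respiratory"), ("06","allergy")] })
    , ("S", { items := [("01","ophthalmology"), ("02","otology"), ("03","ent")] }) ] }

def detect_specialties_from_atc_alt (atc_code : String) : List String :=
  if atc_code = "" then []
  else
    let code := PySem.Str.upper atc_code
    let head := PySem.Str.slice code none (some 1)
    match singleLetter.get? head with
    | some s => [s]
    | none =>
      match subByLetter.get? head with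
      | none => []
      | some sub =>
        match sub.get? (PySem.Str.slice code (some 1) (some 3)) with
        | none => []
        | some s => [s]

-- ===== PRECONDITION & SPEC =====
def Spec_detect_specialties_from_atc (atc_code : String) (out : List String) : Prop := out = detect_specialties_from_atc_alt atc_code
instance (atc_code : String) (out : List String) : Decidable (Spec_detect_specialties_from_atc atc_code out) := by unfold Spec_detect_specialties_from_atc; infer_instance

-- ===== CLAIM (what is proved, stated in full; the proofs are below) =====
def Claim_equal_detect_specialties_from_atc : Prop := ∀ (atc_code : String), Dom_detect_specialties_from_atc atc_code → Spec_detect_specialties_from_atc atc_code (detect_specialties_from_atc atc_code)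

-- ===== LEMMAS AND PROOFS =====
lemma strBeq (p k : String) : (p == k) = (p.toList == k.toList) := by
  simp [String.ext_iff]

lemma ofList_one (x : String) : PySem.Set.ofList [x] = [x] := rfl

-- A's fold keeps the (at most one) matching prefix; B's trie lookups find the same one: case bash on the first three characters.
set_option maxHeartbeats 1600000 in
lemma core (a : String) (he : ¬ a = "") (c : Char) (t : List Char)
    (h : (PySem.Str.upper a).toList = c :: t) :
    detect_specialties_from_atc a = detect_specialties_from_atc_alt a := by
  have h1 : (PySem.Str.slice (PySem.Str.upper a) none (some 1)).toList = [c] := by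
    simp [PySem.Str.toList_slice, h, PySem.List.slice_to _ (show (0:Int) ≤ 1 by norm_num)]
  have h3 : (PySem.Str.slice (PySem.Str.upper a) (some 1) (some 3)).toList = List.take 2 t := by
    rw [PySem.Str.toList_slice, h, PySem.Chars.slice_eq_listSlice]
    rw [show ((1:Int)) = ((1:Nat):Int) by norm_num, show ((3:Int)) = ((3:Nat):Int) by norm_num,
        PySem.List.slice_natCast]
    simp
  unfold detect_specialties_from_atc detect_specialties_from_atc_alt
  rw [if_neg he, if_neg he]
  simp only []
  rw [PySem.List.foldl_append_if]
  by_cases hA : c = 'A'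
  · subst hA
    rcases t with _ | ⟨d, t2⟩
    · simp [ATC_SPECIALTY_MAP, atcItems, singleLetter, subByLetter, PySem.Str.startswith, PySem.Chars.startswith, List.isPrefixOf, h, h3, h1, PySem.Dict.get?, strBeq, ofList_one]
    · by_cases hd : d = '0'
      · subst hd
        rcases t2 with _ | ⟨e, t3⟩
        · simp [ATC_SPECIALTY_MAP, atcItems, singleLetter, subByLetter, PySem.Str.startswith, PySem.Chars.startswith, List.isPrefixOf, h, h3, h1, PySem.Dict.get?, strBeq, ofList_one]
        · by_cases hd1 : e = '1'
          · subst hd1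
            simp [ATC_SPECIALTY_MAP, atcItems, singleLetter, subByLetter, PySem.Str.startswith, PySem.Chars.startswith, List.isPrefixOf, h, h3, h1, PySem.Dict.get?, strBeq, ofList_one]
          · by_cases hd2 : e = '2'
            · subst hd2
              simp [ATC_SPECIALTY_MAP, atcItems, singleLetter, subByLetter, PySem.Str.startswith, PySem.Chars.startswith, List.isPrefixOf, h, h3, h1, PySem.Dict.get?, strBeq, ofList_one]
            · by_cases hd3 : e = '3'
              · subst hd3
                simp [ATC_SPECIALTY_MAP, atcItems, singleLetter, subByLetter, PySem.Str.startswith, PySem.Chars.startswith, List.isPrefixOf, h, h3, h1, PySem.Dict.get?, strBeq, ofList_one]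
              · by_cases hd4 : e = '4'
                · subst hd4
                  simp [ATC_SPECIALTY_MAP, atcItems, singleLetter, subByLetter, PySem.Str.startswith, PySem.Chars.startswith, List.isPrefixOf, h, h3, h1, PySem.Dict.get?, strBeq, ofList_one]
                · by_cases hd5 : e = '5'
                  · subst hd5
                    simp [ATC_SPECIALTY_MAP, atcItems, singleLetter, subByLetter, PySem.Str.startswith, PySem.Chars.startswith, List.isPrefixOf, h, h3, h1, PySem.Dict.get?, strBeq, ofList_one]
                  · by_cases hd6 : e = '6'
                    · subst hd6
                      simp [ATC_SPECIALTY_MAP, atcItems, singleLetter, subByLetter, PySem.Str.startswith, PySem.Chars.startswith, List.isPrefixOf, h, h3, h1, PySem.Dict.get?, strBeq, ofList_one]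
                    · by_cases hd7 : e = '7'
                      · subst hd7
                        simp [ATC_SPECIALTY_MAP, atcItems, singleLetter, subByLetter, PySem.Str.startswith, PySem.Chars.startswith, List.isPrefixOf, h, h3, h1, PySem.Dict.get?, strBeq, ofList_one]
                      · by_cases hd8 : e = '8'
                        · subst hd8
                          simp [ATC_SPECIALTY_MAP, atcItems, singleLetter, subByLetter, PySem.Str.startswith, PySem.Chars.startswith, List.isPrefixOf, h, h3, h1, PySem.Dict.get?, strBeq, ofList_one]
                        · by_cases hd9 : e = '9'
                          · subst hd9
                            simp [ATC_SPECIALTY_MAP, atcItems, singleLetter, subByLetter, PySem.Str.startswith, PySem.Chars.startswith, List.isPrefixOf, h, h3, h1, PySem.Dict.get?, strBeq, ofList_one]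
                          · simp [ATC_SPECIALTY_MAP, atcItems, singleLetter, subByLetter, PySem.Str.startswith, PySem.Chars.startswith, List.isPrefixOf, h, h3, h1, PySem.Dict.get?, strBeq, ofList_one, (show ('1' == e) = false by simp [Ne.symm hd1]), (show ('2' == e) = false by simp [Ne.symm hd2]), (show ('3' == e) = false by simp [Ne.symm hd3]), (show ('4' == e) = false by simp [Ne.symm hd4]), (show ('5' == e) = false by simp [Ne.symm hd5]), (show ('6' == e) = false by simp [Ne.symm hd6]), (show ('7' == e) = false by simp [Ne.symm hd7]), (show ('8' == e) = false by simp [Ne.symm hd8]), (show ('9' == e) = false by simp [Ne.symm hd9])]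
      · simp [ATC_SPECIALTY_MAP, atcItems, singleLetter, subByLetter, PySem.Str.startswith, PySem.Chars.startswith, List.isPrefixOf, h, h3, h1, PySem.Dict.get?, strBeq, ofList_one, (show ('0' == d) = false by simp [Ne.symm hd])]
  ·
    by_cases hB : c = 'B'
    · subst hB
      rcases t with _ | ⟨d, t2⟩
      · simp [ATC_SPECIALTY_MAP, atcItems, singleLetter, subByLetter, PySem.Str.startswith, PySem.Chars.startswith, List.isPrefixOf, h, h3, h1, PySem.Dict.get?, strBeq, ofList_one]
      · by_cases hd : d = '0'
        · subst hd
          rcases t2 with _ | ⟨e, t3⟩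
          · simp [ATC_SPECIALTY_MAP, atcItems, singleLetter, subByLetter, PySem.Str.startswith, PySem.Chars.startswith, List.isPrefixOf, h, h3, h1, PySem.Dict.get?, strBeq, ofList_one]
          · by_cases hd1 : e = '1'
            · subst hd1
              simp [ATC_SPECIALTY_MAP, atcItems, singleLetter, subByLetter, PySem.Str.startswith, PySem.Chars.startswith, List.isPrefixOf, h, h3, h1, PySem.Dict.get?, strBeq, ofList_one]
            · by_cases hd2 : e = '2'
              · subst hd2
                simp [ATC_SPECIALTY_MAP, atcItems, singleLetter, subByLetter, PySem.Str.startswith, PySem.Chars.startswith, List.isPrefixOf, h, h3, h1, PySem.Dict.get?, strBeq, ofList_one]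
              · simp [ATC_SPECIALTY_MAP, atcItems, singleLetter, subByLetter, PySem.Str.startswith, PySem.Chars.startswith, List.isPrefixOf, h, h3, h1, PySem.Dict.get?, strBeq, ofList_one, (show ('1' == e) = false by simp [Ne.symm hd1]), (show ('2' == e) = false by simp [Ne.symm hd2])]
        · simp [ATC_SPECIALTY_MAP, atcItems, singleLetter, subByLetter, PySem.Str.startswith, PySem.Chars.startswith, List.isPrefixOf, h, h3, h1, PySem.Dict.get?, strBeq, ofList_one, (show ('0' == d) = false by simp [Ne.symm hd])]
    ·
      by_cases hC : c = 'C'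
      · subst hC
        rcases t with _ | ⟨d, t2⟩
        · simp [ATC_SPECIALTY_MAP, atcItems, singleLetter, subByLetter, PySem.Str.startswith, PySem.Chars.startswith, List.isPrefixOf, h, h3, h1, PySem.Dict.get?, strBeq, ofList_one]
        · by_cases hd : d = '0'
          · subst hd
            rcases t2 with _ | ⟨e, t3⟩
            · simp [ATC_SPECIALTY_MAP, atcItems, singleLetter, subByLetter, PySem.Str.startswith, PySem.Chars.startswith, List.isPrefixOf, h, h3, h1, PySem.Dict.get?, strBeq, ofList_one]
            · by_cases hd1 : e = '1'
              · subst hd1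
                simp [ATC_SPECIALTY_MAP, atcItems, singleLetter, subByLetter, PySem.Str.startswith, PySem.Chars.startswith, List.isPrefixOf, h, h3, h1, PySem.Dict.get?, strBeq, ofList_one]
              · by_cases hd2 : e = '2'
                · subst hd2
                  simp [ATC_SPECIALTY_MAP, atcItems, singleLetter, subByLetter, PySem.Str.startswith, PySem.Chars.startswith, List.isPrefixOf, h, h3, h1, PySem.Dict.get?, strBeq, ofList_one]
                · by_cases hd3 : e = '3'
                  · subst hd3
                    simp [ATC_SPECIALTY_MAP, atcItems, singleLetter, subByLetter, PySem.Str.startswith, PySem.Chars.startswith, List.isPrefixOf, h, h3, h1, PySem.Dict.get?, strBeq, ofList_one]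
                  · by_cases hd4 : e = '4'
                    · subst hd4
                      simp [ATC_SPECIALTY_MAP, atcItems, singleLetter, subByLetter, PySem.Str.startswith, PySem.Chars.startswith, List.isPrefixOf, h, h3, h1, PySem.Dict.get?, strBeq, ofList_one]
                    · by_cases hd5 : e = '5'
                      · subst hd5
                        simp [ATC_SPECIALTY_MAP, atcItems, singleLetter, subByLetter, PySem.Str.startswith, PySem.Chars.startswith, List.isPrefixOf, h, h3, h1, PySem.Dict.get?, strBeq, ofList_one]
                      · by_cases hd7 : e = '7'
                        · subst hd7
                          simp [ATC_SPECIALTY_MAP, atcItems, singleLetter, subByLetter, PySem.Str.startswith, PySem.Chars.startswith, List.isPrefixOf, h, h3, h1, PySem.Dict.get?, strBeq, ofList_one]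
                        · by_cases hd8 : e = '8'
                          · subst hd8
                            simp [ATC_SPECIALTY_MAP, atcItems, singleLetter, subByLetter, PySem.Str.startswith, PySem.Chars.startswith, List.isPrefixOf, h, h3, h1, PySem.Dict.get?, strBeq, ofList_one]
                          · by_cases hd9 : e = '9'
                            · subst hd9
                              simp [ATC_SPECIALTY_MAP, atcItems, singleLetter, subByLetter, PySem.Str.startswith, PySem.Chars.startswith, List.isPrefixOf, h, h3, h1, PySem.Dict.get?, strBeq, ofList_one]
                            · simp [ATC_SPECIALTY_MAP, atcItems, singleLetter, subByLetter, PySem.Str.startswith, PySem.Chars.startswith, List.isPrefixOf, h, h3, h1, PySem.Dict.get?, strBeq, ofList_one, (show ('1' == e) = false by simp [Ne.symm hd1]), (show ('2' == e) = false by simp [Ne.symm hd2]), (show ('3' == e) = false by simp [Ne.symm hd3]), (show ('4' == e) = false by simp [Ne.symm hd4]), (show ('5' == e) = false by simp [Ne.symm hd5]), (show ('7' == e) = false by simp [Ne.symm hd7]), (show ('8' == e) = false by simp [Ne.symm hd8]), (show ('9' == e) = false by simp [Ne.symm hd9])]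
          · simp [ATC_SPECIALTY_MAP, atcItems, singleLetter, subByLetter, PySem.Str.startswith, PySem.Chars.startswith, List.isPrefixOf, h, h3, h1, PySem.Dict.get?, strBeq, ofList_one, (show ('0' == d) = false by simp [Ne.symm hd])]
      ·
        by_cases hD : c = 'D'
        · subst hD
          rcases t with _ | ⟨d, t2⟩
          · simp [ATC_SPECIALTY_MAP, atcItems, singleLetter, subByLetter, PySem.Str.startswith, PySem.Chars.startswith, List.isPrefixOf, h, h3, h1, PySem.Dict.get?, strBeq, ofList_one]
          · simp [ATC_SPECIALTY_MAP, atcItems, singleLetter, subByLetter, PySem.Str.startswith, PySem.Chars.startswith, List.isPrefixOf, h, h3, h1, PySem.Dict.get?, strBeq, ofList_one]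
        ·
          by_cases hG : c = 'G'
          · subst hG
            rcases t with _ | ⟨d, t2⟩
            · simp [ATC_SPECIALTY_MAP, atcItems, singleLetter, subByLetter, PySem.Str.startswith, PySem.Chars.startswith, List.isPrefixOf, h, h3, h1, PySem.Dict.get?, strBeq, ofList_one]
            · by_cases hd : d = '0'
              · subst hd
                rcases t2 with _ | ⟨e, t3⟩
                · simp [ATC_SPECIALTY_MAP, atcItems, singleLetter, subByLetter, PySem.Str.startswith, PySem.Chars.startswith, List.isPrefixOf, h, h3, h1, PySem.Dict.get?, strBeq, ofList_one]
                · by_cases hd1 : e = '1'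
                  · subst hd1
                    simp [ATC_SPECIALTY_MAP, atcItems, singleLetter, subByLetter, PySem.Str.startswith, PySem.Chars.startswith, List.isPrefixOf, h, h3, h1, PySem.Dict.get?, strBeq, ofList_one]
                  · by_cases hd2 : e = '2'
                    · subst hd2
                      simp [ATC_SPECIALTY_MAP, atcItems, singleLetter, subByLetter, PySem.Str.startswith, PySem.Chars.startswith, List.isPrefixOf, h, h3, h1, PySem.Dict.get?, strBeq, ofList_one]
                    · by_cases hd3 : e = '3'
                      · subst hd3
                        simp [ATC_SPECIALTY_MAP, atcItems, singleLetter, subByLetter, PySem.Str.startswith, PySem.Chars.startswith, List.isPrefixOf, h, h3, h1, PySem.Dict.get?, strBeq, ofList_one]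
                      · simp [ATC_SPECIALTY_MAP, atcItems, singleLetter, subByLetter, PySem.Str.startswith, PySem.Chars.startswith, List.isPrefixOf, h, h3, h1, PySem.Dict.get?, strBeq, ofList_one, (show ('1' == e) = false by simp [Ne.symm hd1]), (show ('2' == e) = false by simp [Ne.symm hd2]), (show ('3' == e) = false by simp [Ne.symm hd3])]
              · simp [ATC_SPECIALTY_MAP, atcItems, singleLetter, subByLetter, PySem.Str.startswith, PySem.Chars.startswith, List.isPrefixOf, h, h3, h1, PySem.Dict.get?, strBeq, ofList_one, (show ('0' == d) = false by simp [Ne.symm hd])]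
          ·
            by_cases hH : c = 'H'
            · subst hH
              rcases t with _ | ⟨d, t2⟩
              · simp [ATC_SPECIALTY_MAP, atcItems, singleLetter, subByLetter, PySem.Str.startswith, PySem.Chars.startswith, List.isPrefixOf, h, h3, h1, PySem.Dict.get?, strBeq, ofList_one]
              · simp [ATC_SPECIALTY_MAP, atcItems, singleLetter, subByLetter, PySem.Str.startswith, PySem.Chars.startswith, List.isPrefixOf, h, h3, h1, PySem.Dict.get?, strBeq, ofList_one]
            ·
              by_cases hJ : c = 'J'
              · subst hJ
                rcases t with _ | ⟨d, t2⟩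
                · simp [ATC_SPECIALTY_MAP, atcItems, singleLetter, subByLetter, PySem.Str.startswith, PySem.Chars.startswith, List.isPrefixOf, h, h3, h1, PySem.Dict.get?, strBeq, ofList_one]
                · simp [ATC_SPECIALTY_MAP, atcItems, singleLetter, subByLetter, PySem.Str.startswith, PySem.Chars.startswith, List.isPrefixOf, h, h3, h1, PySem.Dict.get?, strBeq, ofList_one]
              ·
                by_cases hL : c = 'L'
                · subst hL
                  rcases t with _ | ⟨d, t2⟩
                  · simp [ATC_SPECIALTY_MAP, atcItems, singleLetter, subByLetter, PySem.Str.startswith, PySem.Chars.startswith, List.isPrefixOf, h, h3, h1, PySem.Dict.get?, strBeq, ofList_one]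
                  · simp [ATC_SPECIALTY_MAP, atcItems, singleLetter, subByLetter, PySem.Str.startswith, PySem.Chars.startswith, List.isPrefixOf, h, h3, h1, PySem.Dict.get?, strBeq, ofList_one]
                ·
                  by_cases hM : c = 'M'
                  · subst hM
                    rcases t with _ | ⟨d, t2⟩
                    · simp [ATC_SPECIALTY_MAP, atcItems, singleLetter, subByLetter, PySem.Str.startswith, PySem.Chars.startswith, List.isPrefixOf, h, h3, h1, PySem.Dict.get?, strBeq, ofList_one]
                    · by_cases hd : d = '0'
                      · subst hd
                        rcases t2 with _ | ⟨e, t3⟩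
                        · simp [ATC_SPECIALTY_MAP, atcItems, singleLetter, subByLetter, PySem.Str.startswith, PySem.Chars.startswith, List.isPrefixOf, h, h3, h1, PySem.Dict.get?, strBeq, ofList_one]
                        · by_cases hd1 : e = '1'
                          · subst hd1
                            simp [ATC_SPECIALTY_MAP, atcItems, singleLetter, subByLetter, PySem.Str.startswith, PySem.Chars.startswith, List.isPrefixOf, h, h3, h1, PySem.Dict.get?, strBeq, ofList_one]
                          · by_cases hd3 : e = '3'
                            · subst hd3
                              simp [ATC_SPECIALTY_MAP, atcItems, singleLetter, subByLetter, PySem.Str.startswith, PySem.Chars.startswith, List.isPrefixOf, h, h3, h1, PySem.Dict.get?, strBeq, ofList_one]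
                            · by_cases hd4 : e = '4'
                              · subst hd4
                                simp [ATC_SPECIALTY_MAP, atcItems, singleLetter, subByLetter, PySem.Str.startswith, PySem.Chars.startswith, List.isPrefixOf, h, h3, h1, PySem.Dict.get?, strBeq, ofList_one]
                              · by_cases hd5 : e = '5'
                                · subst hd5
                                  simp [ATC_SPECIALTY_MAP, atcItems, singleLetter, subByLetter, PySem.Str.startswith, PySem.Chars.startswith, List.isPrefixOf, h, h3, h1, PySem.Dict.get?, strBeq, ofList_one]
                                · simp [ATC_SPECIALTY_MAP, atcItems, singleLetter, subByLetter, PySem.Str.startswith, PySem.Chars.startswith, List.isPrefixOf, h, h3, h1, PySem.Dict.get?, strBeq, ofList_one, (show ('1' == e) = false by simp [Ne.symm hd1]), (show ('3' == e) = false by simp [Ne.symm hd3]), (show ('4' == e) = false by simp [Ne.symm hd4]), (show ('5' == e) = false by simp [Ne.symm hd5])]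
                      · simp [ATC_SPECIALTY_MAP, atcItems, singleLetter, subByLetter, PySem.Str.startswith, PySem.Chars.startswith, List.isPrefixOf, h, h3, h1, PySem.Dict.get?, strBeq, ofList_one, (show ('0' == d) = false by simp [Ne.symm hd])]
                  ·
                    by_cases hN : c = 'N'
                    · subst hN
                      rcases t with _ | ⟨d, t2⟩
                      · simp [ATC_SPECIALTY_MAP, atcItems, singleLetter, subByLetter, PySem.Str.startswith, PySem.Chars.startswith, List.isPrefixOf, h, h3, h1, PySem.Dict.get?, strBeq, ofList_one]
                      · by_cases hd : d = '0'
                        · subst hd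
                          rcases t2 with _ | ⟨e, t3⟩
                          · simp [ATC_SPECIALTY_MAP, atcItems, singleLetter, subByLetter, PySem.Str.startswith, PySem.Chars.startswith, List.isPrefixOf, h, h3, h1, PySem.Dict.get?, strBeq, ofList_one]
                          · by_cases hd1 : e = '1'
                            · subst hd1
                              simp [ATC_SPECIALTY_MAP, atcItems, singleLetter, subByLetter, PySem.Str.startswith, PySem.Chars.startswith, List.isPrefixOf, h, h3, h1, PySem.Dict.get?, strBeq, ofList_one]
                            · by_cases hd2 : e = '2'
                              · subst hd2
                                simp [ATC_SPECIALTY_MAP, atcItems, singleLetter, subByLetter, PySem.Str.startswith, PySem.Chars.startswith, List.isPrefixOf, h, h3, h1, PySem.Dict.get?, strBeq, ofList_one]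
                              · by_cases hd3 : e = '3'
                                · subst hd3
                                  simp [ATC_SPECIALTY_MAP, atcItems, singleLetter, subByLetter, PySem.Str.startswith, PySem.Chars.startswith, List.isPrefixOf, h, h3, h1, PySem.Dict.get?, strBeq, ofList_one]
                                · by_cases hd4 : e = '4'
                                  · subst hd4
                                    simp [ATC_SPECIALTY_MAP, atcItems, singleLetter, subByLetter, PySem.Str.startswith, PySem.Chars.startswith, List.isPrefixOf, h, h3, h1, PySem.Dict.get?, strBeq, ofList_one]
                                  · by_cases hd5 : e = '5'
                                    · subst hd5
                                      simp [ATC_SPECIALTY_MAP, atcItems, singleLetter, subByLetter, PySem.Str.startswith, PySem.Chars.startswith, List.isPrefixOf, h, h3, h1, PySem.Dict.get?, strBeq, ofList_one]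
                                    · by_cases hd6 : e = '6'
                                      · subst hd6
                                        simp [ATC_SPECIALTY_MAP, atcItems, singleLetter, subByLetter, PySem.Str.startswith, PySem.Chars.startswith, List.isPrefixOf, h, h3, h1, PySem.Dict.get?, strBeq, ofList_one]
                                      · by_cases hd7 : e = '7'
                                        · subst hd7
                                          simp [ATC_SPECIALTY_MAP, atcItems, singleLetter, subByLetter, PySem.Str.startswith, PySem.Chars.startswith, List.isPrefixOf, h, h3, h1, PySem.Dict.get?, strBeq, ofList_one]
                                        · simp [ATC_SPECIALTY_MAP, atcItems, singleLetter, subByLetter, PySem.Str.startswith, PySem.Chars.startswith, List.isPrefixOf, h, h3, h1, PySem.Dict.get?, strBeq, ofList_one, (show ('1' == e) = false by simp [Ne.symm hd1]), (show ('2' == e) = false by simp [Ne.symm hd2]), (show ('3' == e) = false by simp [Ne.symm hd3]), (show ('4' == e) = false by simp [Ne.symm hd4]), (show ('5' == e) = false by simp [Ne.symm hd5]), (show ('6' == e) = false by simp [Ne.symm hd6]), (show ('7' == e) = false by simp [Ne.symm hd7])]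
                        · simp [ATC_SPECIALTY_MAP, atcItems, singleLetter, subByLetter, PySem.Str.startswith, PySem.Chars.startswith, List.isPrefixOf, h, h3, h1, PySem.Dict.get?, strBeq, ofList_one, (show ('0' == d) = false by simp [Ne.symm hd])]
                    ·
                      by_cases hR : c = 'R'
                      · subst hR
                        rcases t with _ | ⟨d, t2⟩
                        · simp [ATC_SPECIALTY_MAP, atcItems, singleLetter, subByLetter, PySem.Str.startswith, PySem.Chars.startswith, List.isPrefixOf, h, h3, h1, PySem.Dict.get?, strBeq, ofList_one]
                        · by_cases hd : d = '0'
                          · subst hd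
                            rcases t2 with _ | ⟨e, t3⟩
                            · simp [ATC_SPECIALTY_MAP, atcItems, singleLetter, subByLetter, PySem.Str.startswith, PySem.Chars.startswith, List.isPrefixOf, h, h3, h1, PySem.Dict.get?, strBeq, ofList_one]
                            · by_cases hd1 : e = '1'
                              · subst hd1
                                simp [ATC_SPECIALTY_MAP, atcItems, singleLetter, subByLetter, PySem.Str.startswith, PySem.Chars.startswith, List.isPrefixOf, h, h3, h1, PySem.Dict.get?, strBeq, ofList_one]
                              · by_cases hd2 : e = '2'
                                · subst hd2
                                  simp [ATC_SPECIALTY_MAP, atcItems, singleLetter, subByLetter, PySem.Str.startswith, PySem.Chars.startswith, List.isPrefixOf, h, h3, h1, PySem.Dict.get?, strBeq, ofList_one]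
                                · by_cases hd3 : e = '3'
                                  · subst hd3
                                    simp [ATC_SPECIALTY_MAP, atcItems, singleLetter, subByLetter, PySem.Str.startswith, PySem.Chars.startswith, List.isPrefixOf, h, h3, h1, PySem.Dict.get?, strBeq, ofList_one]
                                  · by_cases hd5 : e = '5'
                                    · subst hd5
                                      simp [ATC_SPECIALTY_MAP, atcItems, singleLetter, subByLetter, PySem.Str.startswith, PySem.Chars.startswith, List.isPrefixOf, h, h3, h1, PySem.Dict.get?, strBeq, ofList_one]
                                    · by_cases hd6 : e = '6'
                                      · subst hd6
                                        simp [ATC_SPECIALTY_MAP, atcItems, singleLetter, subByLetter, PySem.Str.startswith, PySem.Chars.startswith, List.isPrefixOf, h, h3, h1, PySem.Dict.get?, strBeq, ofList_one]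
                                      · simp [ATC_SPECIALTY_MAP, atcItems, singleLetter, subByLetter, PySem.Str.startswith, PySem.Chars.startswith, List.isPrefixOf, h, h3, h1, PySem.Dict.get?, strBeq, ofList_one, (show ('1' == e) = false by simp [Ne.symm hd1]), (show ('2' == e) = false by simp [Ne.symm hd2]), (show ('3' == e) = false by simp [Ne.symm hd3]), (show ('5' == e) = false by simp [Ne.symm hd5]), (show ('6' == e) = false by simp [Ne.symm hd6])]
                          · simp [ATC_SPECIALTY_MAP, atcItems, singleLetter, subByLetter, PySem.Str.startswith, PySem.Chars.startswith, List.isPrefixOf, h, h3, h1, PySem.Dict.get?, strBeq, ofList_one, (show ('0' == d) = false by simp [Ne.symm hd])]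
                      ·
                        by_cases hS : c = 'S'
                        · subst hS
                          rcases t with _ | ⟨d, t2⟩
                          · simp [ATC_SPECIALTY_MAP, atcItems, singleLetter, subByLetter, PySem.Str.startswith, PySem.Chars.startswith, List.isPrefixOf, h, h3, h1, PySem.Dict.get?, strBeq, ofList_one]
                          · by_cases hd : d = '0'
                            · subst hd
                              rcases t2 with _ | ⟨e, t3⟩
                              · simp [ATC_SPECIALTY_MAP, atcItems, singleLetter, subByLetter, PySem.Str.startswith, PySem.Chars.startswith, List.isPrefixOf, h, h3, h1, PySem.Dict.get?, strBeq, ofList_one]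
                              · by_cases hd1 : e = '1'
                                · subst hd1
                                  simp [ATC_SPECIALTY_MAP, atcItems, singleLetter, subByLetter, PySem.Str.startswith, PySem.Chars.startswith, List.isPrefixOf, h, h3, h1, PySem.Dict.get?, strBeq, ofList_one]
                                · by_cases hd2 : e = '2'
                                  · subst hd2
                                    simp [ATC_SPECIALTY_MAP, atcItems, singleLetter, subByLetter, PySem.Str.startswith, PySem.Chars.startswith, List.isPrefixOf, h, h3, h1, PySem.Dict.get?, strBeq, ofList_one]
                                  · by_cases hd3 : e = '3'
                                    · subst hd3
                                      simp [ATC_SPECIALTY_MAP, atcItems, singleLetter, subByLetter, PySem.Str.startswith, PySem.Chars.startswith, List.isPrefixOf, h, h3, h1, PySem.Dict.get?, strBeq, ofList_one]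
                                    · simp [ATC_SPECIALTY_MAP, atcItems, singleLetter, subByLetter, PySem.Str.startswith, PySem.Chars.startswith, List.isPrefixOf, h, h3, h1, PySem.Dict.get?, strBeq, ofList_one, (show ('1' == e) = false by simp [Ne.symm hd1]), (show ('2' == e) = false by simp [Ne.symm hd2]), (show ('3' == e) = false by simp [Ne.symm hd3])]
                            · simp [ATC_SPECIALTY_MAP, atcItems, singleLetter, subByLetter, PySem.Str.startswith, PySem.Chars.startswith, List.isPrefixOf, h, h3, h1, PySem.Dict.get?, strBeq, ofList_one, (show ('0' == d) = false by simp [Ne.symm hd])]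
                        · simp [ATC_SPECIALTY_MAP, atcItems, singleLetter, subByLetter, PySem.Str.startswith, PySem.Chars.startswith, List.isPrefixOf, h, h3, h1, PySem.Dict.get?, strBeq, ofList_one, (show ('A' == c) = false by simp [Ne.symm hA]), (show ('B' == c) = false by simp [Ne.symm hB]), (show ('C' == c) = false by simp [Ne.symm hC]), (show ('D' == c) = false by simp [Ne.symm hD]), (show ('G' == c) = false by simp [Ne.symm hG]), (show ('H' == c) = false by simp [Ne.symm hH]), (show ('J' == c) = false by simp [Ne.symm hJ]), (show ('L' == c) = false by simp [Ne.symm hL]), (show ('M' == c) = false by simp [Ne.symm hM]), (show ('N' == c) = false by simp [Ne.symm hN]), (show ('R' == c) = false by simp [Ne.symm hR]), (show ('S' == c) = false by simp [Ne.symm hS])]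

-- ===== VERDICT (by name: the statement is the Claim_ definition above) =====
theorem detect_specialties_from_atc_spec : Claim_equal_detect_specialties_from_atc := by
  intro a _
  unfold Spec_detect_specialties_from_atc
  by_cases he : a = ""
  · simp [he, detect_specialties_from_atc, detect_specialties_from_atc_alt]
  · obtain ⟨cc, tt, hct⟩ : ∃ c t, (PySem.Str.upper a).toList = c :: t := by
      rw [PySem.Str.toList_upper]
      cases hx : a.toList with
      | nil => exact absurd (String.ext_iff.mpr (by simp [hx])) he
      | cons y ys => exact ⟨PySem.Chars.upperChar y, PySem.Chars.upper ys, by simp [PySem.Chars.upper]⟩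
    exact core a he cc tt hct
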